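-- pv_equiv track=rewrite | github.com/mmbori/Transform_IndirectCall | sqlite3_minimize_sysfun_done/cocci/3_extract_fp_in_struct_onlyPy_improved_compensate.py | resolve_alias
-- ===== SOURCE A (Python) =====
-- from typing import Dict, List, Set, Tuple, Optional
--
-- def resolve_alias(name: str, macro_map: Dict[str,str], local_map: Dict[str,str]) -> str:
--     seen = set()
--     cur = name
--     while True:
--         if cur in seen:
--             return cur
--         seen.add(cur)
--         if cur in local_map:
--             cur = local_map[cur]; continue
--         if cur in macro_map:
--             cur = macro_map[cur]; continue
--         break
--     return cur
-- ===== SOURCE B (Python) =====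
-- def resolve_alias(name, macro_map, local_map):
--     def step(x):
--         if x in local_map:
--             return local_map[x]
--         if x in macro_map:
--             return macro_map[x]
--         return None
--
--     # Phase 1: Floyd tortoise-and-hare; bail out to a plain walk if the chain ends.
--     slow = name
--     fast = name
--     meet = None
--     while True:
--         nf = step(fast)
--         if nf is None:
--             break
--         nf2 = step(nf)
--         if nf2 is None:
--             break
--         slow = step(slow)
--         fast = nf2
--         if slow == fast:
--             meet = fast
--             break
--     if meet is None:
--         # the chain terminates: return its last node
--         cur = name
--         while True:
--             n = step(cur)
--             if n is None:
--                 return cur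
--             cur = n
--     # Phase 2: advance both one step at a time; they meet at the cycle entry,
--     # which is exactly the first node the original walk revisits.
--     slow = name
--     fast = meet
--     while slow != fast:
--         slow = step(slow)
--         fast = step(fast)
--     return slow
-- ===== Notes on version B (the rewrite author's own statement) =====
-- stated objective: alternative
-- what changed: Replaces the seen-set cycle detection with Floyd's tortoise-and-hare (O(1) extra space): phase 1 detects a cycle or the chain's end, phase 2 finds the cycle entry, which equals the first node A re-encounters.
import Mathlib
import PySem

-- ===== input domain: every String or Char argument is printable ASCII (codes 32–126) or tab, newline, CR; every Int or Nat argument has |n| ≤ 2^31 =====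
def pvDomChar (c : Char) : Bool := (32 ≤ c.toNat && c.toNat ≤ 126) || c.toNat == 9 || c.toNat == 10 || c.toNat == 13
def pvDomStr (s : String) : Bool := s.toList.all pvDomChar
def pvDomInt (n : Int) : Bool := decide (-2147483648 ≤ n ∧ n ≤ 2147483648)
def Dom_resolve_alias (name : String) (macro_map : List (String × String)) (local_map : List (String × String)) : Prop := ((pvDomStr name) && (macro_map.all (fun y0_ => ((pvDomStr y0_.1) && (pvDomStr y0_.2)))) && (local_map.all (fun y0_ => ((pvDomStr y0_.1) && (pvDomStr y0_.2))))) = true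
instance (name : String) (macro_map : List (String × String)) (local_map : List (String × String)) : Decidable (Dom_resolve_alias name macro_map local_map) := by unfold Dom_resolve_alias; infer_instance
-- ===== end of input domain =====

-- B replaces A's seen-set cycle detection by Floyd's tortoise-and-hare (constant extra space); same return value, proved equal on all inputs.

-- ===== PORT A =====
-- A's 'while True' loop; the Nat fuel only makes the recursion structural: the loop
-- always returns within local_map.length + macro_map.length + 2 iterations (proved below),
-- so the fuel-0 branch is unreachable.
def resolveAliasLoop (macro_map local_map : List (String × String)) : Nat → PySem.Set String → String → String
  | 0, _, cur => cur
  | fuel+1, seen, cur =>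
    if PySem.Set.contains seen cur then cur
    else
      let seen' := PySem.Set.add seen cur
      match (PySem.Dict.mk local_map).get? cur with
      | some v => resolveAliasLoop macro_map local_map fuel seen' v
      | none =>
        match (PySem.Dict.mk macro_map).get? cur with
        | some v => resolveAliasLoop macro_map local_map fuel seen' v
        | none => cur

def resolve_alias (name : String) (macro_map : List (String × String)) (local_map : List (String × String)) : String :=
  resolveAliasLoop macro_map local_map (local_map.length + macro_map.length + 2) PySem.Set.empty name

-- ===== PORT B =====
-- Source B's helper step(x): local_map first, then macro_map, else None.
def pvStep (macro_map local_map : List (String × String)) (x : String) : Option String :=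
  match (PySem.Dict.mk local_map).get? x with
  | some v => some v
  | none => (PySem.Dict.mk macro_map).get? x

-- phase 1: hare moves two steps, tortoise one; 'none' = a step returned None (chain ends),
-- 'some v' = tortoise and hare met at v.  Fuel only for structural recursion (unreachable at 0).
def pvFloyd1 (macro_map local_map : List (String × String)) : Nat → String → String → Option String
  | 0, _, _ => none
  | fuel+1, slow, fast =>
    match pvStep macro_map local_map fast with
    | none => none
    | some nf =>
      match pvStep macro_map local_map nf with
      | none => none
      | some nf2 =>
        -- Python: slow = step(slow); never None here (slow trails fast), so getD is exact
        let slow' := (pvStep macro_map local_map slow).getD slow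
        if slow' = nf2 then some nf2 else pvFloyd1 macro_map local_map fuel slow' nf2

-- the terminating-chain walk of Source B
def pvTermWalk (macro_map local_map : List (String × String)) : Nat → String → String
  | 0, cur => cur
  | fuel+1, cur =>
    match pvStep macro_map local_map cur with
    | none => cur
    | some v => pvTermWalk macro_map local_map fuel v

-- phase 2: both advance one step until they meet (steps are never None here; getD is exact)
def pvPhase2 (macro_map local_map : List (String × String)) : Nat → String → String → String
  | 0, slow, _ => slow
  | fuel+1, slow, fast =>
    if slow = fast then slow
    else pvPhase2 macro_map local_map fuel
      ((pvStep macro_map local_map slow).getD slow)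
      ((pvStep macro_map local_map fast).getD fast)

def resolve_alias_alt (name : String) (macro_map : List (String × String)) (local_map : List (String × String)) : String :=
  match pvFloyd1 macro_map local_map (local_map.length + macro_map.length + 2) name name with
  | none => pvTermWalk macro_map local_map (local_map.length + macro_map.length + 2) name
  | some meet => pvPhase2 macro_map local_map (local_map.length + macro_map.length + 2) name meet

-- ===== PRECONDITION & SPEC =====
def Spec_resolve_alias (name : String) (macro_map : List (String × String)) (local_map : List (String × String)) (out : String) : Prop := out = resolve_alias_alt name macro_map local_map
instance (name : String) (macro_map : List (String × String)) (local_map : List (String × String)) (out : String) : Decidable (Spec_resolve_alias name macro_map local_map out) := by unfold Spec_resolve_alias; infer_instance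

-- ===== CLAIM (what is proved, stated in full; the proofs are below) =====
def Claim_equal_resolve_alias : Prop := ∀ (name : String) (macro_map : List (String × String)) (local_map : List (String × String)), Dom_resolve_alias name macro_map local_map → Spec_resolve_alias name macro_map local_map (resolve_alias name macro_map local_map)

-- ===== LEMMAS AND PROOFS =====

-- the total step function: g x = step x if defined, else x (a terminal node is a fixpoint)
def pvG (macro_map local_map : List (String × String)) (x : String) : String :=
  (pvStep macro_map local_map x).getD x

-- the walk from name
def pvX (macro_map local_map : List (String × String)) (name : String) : Nat → String
  | 0 => name
  | i+1 => pvG macro_map local_map (pvX macro_map local_map name i)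

lemma pvX_succ_of_some {M L : List (String × String)} {name v : String} {i : Nat}
    (h : pvStep M L (pvX M L name i) = some v) : pvX M L name (i+1) = v := by
  simp [pvX, pvG, h]

lemma pvX_succ_of_none {M L : List (String × String)} {name : String} {i : Nat}
    (h : pvStep M L (pvX M L name i) = none) : pvX M L name (i+1) = pvX M L name i := by
  simp [pvX, pvG, h]

lemma pvGet_mem_values (d : List (String × String)) (x v : String)
    (h : (PySem.Dict.mk d).get? x = some v) : v ∈ d.map Prod.snd := by
  induction d with
  | nil => simp [PySem.Dict.get?] at h
  | cons p rest ih =>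
    rw [PySem.Dict.get?_mk_cons] at h
    simp only [List.map_cons, List.mem_cons]
    by_cases hx : p.1 == x
    · rw [if_pos hx] at h
      injection h with h
      exact Or.inl h.symm
    · rw [if_neg hx] at h
      exact Or.inr (ih h)

lemma pvX_mem (M L : List (String × String)) (name : String) :
    ∀ i, pvX M L name i ∈ name :: (L.map Prod.snd ++ M.map Prod.snd) := by
  intro i
  induction i with
  | zero => simp [pvX]
  | succ i ih =>
    cases h : pvStep M L (pvX M L name i) with
    | none => rw [pvX_succ_of_none h]; exact ih
    | some v =>
      rw [pvX_succ_of_some h]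
      unfold pvStep at h
      cases hl : (PySem.Dict.mk L).get? (pvX M L name i) with
      | some w =>
        rw [hl] at h
        injection h with h
        subst h
        have hv := pvGet_mem_values L _ _ hl
        simp only [List.mem_cons, List.mem_append]
        exact Or.inr (Or.inl hv)
      | none =>
        rw [hl] at h
        have hv := pvGet_mem_values M _ _ h
        simp only [List.mem_cons, List.mem_append]
        exact Or.inr (Or.inr hv)

lemma pv_exists_repeat (M L : List (String × String)) (name : String) :
    ∃ kk, kk ≤ L.length + M.length + 1 ∧ ∃ j, j < kk ∧ pvX M L name j = pvX M L name kk := by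
  have hcard : ((name :: (L.map Prod.snd ++ M.map Prod.snd)).toFinset).card
      < (Finset.range (L.length + M.length + 2)).card := by
    calc ((name :: (L.map Prod.snd ++ M.map Prod.snd)).toFinset).card
        ≤ (name :: (L.map Prod.snd ++ M.map Prod.snd)).length := List.toFinset_card_le _
      _ < (Finset.range (L.length + M.length + 2)).card := by
          simp only [List.length_cons, List.length_append, List.length_map, Finset.card_range]
          omega
  obtain ⟨a, ha, b, hb, hne, heq⟩ :=
    Finset.exists_ne_map_eq_of_card_lt_of_maps_to hcard
      (f := fun i => pvX M L name i)
      (fun i _ => List.mem_toFinset.mpr (pvX_mem M L name i))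
  simp [Finset.mem_range] at ha hb
  rcases Nat.lt_or_ge a b with hab | hba
  · exact ⟨b, by omega, a, hab, heq⟩
  · have hba' : b < a := by omega
    exact ⟨a, by omega, b, hba', heq.symm⟩

-- ρ-shape lemmas: μ = tail length, lam = cycle length, assuming
--   hrep  : X (μ+lam) = X μ
--   hdist : all of X 0 … X (μ+lam-1) are pairwise distinct
lemma pvPeriodic (M L : List (String × String)) (name : String) (μ lam : Nat)
    (hrep : pvX M L name (μ+lam) = pvX M L name μ) :
    ∀ t, μ ≤ t → pvX M L name (t+lam) = pvX M L name t := by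
  intro t ht
  induction t, ht using Nat.le_induction with
  | base => exact hrep
  | succ t ht ih =>
    have h1 : t+1+lam = (t+lam)+1 := by omega
    rw [h1]
    show pvG M L (pvX M L name (t+lam)) = pvX M L name (t+1)
    rw [ih]; rfl

lemma pvPeriodicMul (M L : List (String × String)) (name : String) (μ lam : Nat)
    (hrep : pvX M L name (μ+lam) = pvX M L name μ) :
    ∀ c t, μ ≤ t → pvX M L name (t + lam*c) = pvX M L name t := by
  intro c
  induction c with
  | zero => intro t _; simp
  | succ c ih =>
    intro t ht
    have h1 : t + lam*(c+1) = (t + lam*c) + lam := by ring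
    rw [h1, pvPeriodic M L name μ lam hrep _ (by omega), ih t ht]

lemma pvReduce (M L : List (String × String)) (name : String) (μ lam : Nat)
    (_hlam : 0 < lam) (hrep : pvX M L name (μ+lam) = pvX M L name μ) :
    ∀ b, μ ≤ b → pvX M L name b = pvX M L name (μ + (b-μ) % lam) := by
  intro b hb
  have hdm := Nat.div_add_mod (b-μ) lam
  have h1 : b = (μ + (b-μ) % lam) + lam * ((b-μ)/lam) := by omega
  conv_lhs => rw [h1]
  exact pvPeriodicMul M L name μ lam hrep _ _ (by omega)

lemma pvLowNe (M L : List (String × String)) (name : String) (μ lam : Nat)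
    (hlam : 0 < lam) (hrep : pvX M L name (μ+lam) = pvX M L name μ)
    (hdist : ∀ a b, a < b → b < μ+lam → pvX M L name a ≠ pvX M L name b) :
    ∀ a b, a < μ → μ ≤ b → pvX M L name a ≠ pvX M L name b := by
  intro a b ha hb heq
  have hr := pvReduce M L name μ lam hlam hrep b hb
  have hlt : μ + (b-μ) % lam < μ + lam := by have := Nat.mod_lt (b-μ) hlam; omega
  exact hdist a (μ + (b-μ) % lam) (by omega) hlt (heq.trans hr)

lemma pvEqMod (M L : List (String × String)) (name : String) (μ lam : Nat)
    (hlam : 0 < lam) (hrep : pvX M L name (μ+lam) = pvX M L name μ)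
    (hdist : ∀ a b, a < b → b < μ+lam → pvX M L name a ≠ pvX M L name b) :
    ∀ a b, μ ≤ a → μ ≤ b → pvX M L name a = pvX M L name b → (a-μ) % lam = (b-μ) % lam := by
  intro a b ha hb heq
  have hra := pvReduce M L name μ lam hlam hrep a ha
  have hrb := pvReduce M L name μ lam hlam hrep b hb
  by_contra hne
  have hmla := Nat.mod_lt (a-μ) hlam
  have hmlb := Nat.mod_lt (b-μ) hlam
  have heq2 : pvX M L name (μ + (a-μ) % lam) = pvX M L name (μ + (b-μ) % lam) :=
    hra.symm.trans (heq.trans hrb)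
  rcases Nat.lt_trichotomy ((a-μ) % lam) ((b-μ) % lam) with h | h | h
  · exact hdist _ _ (by omega) (by omega) heq2 
  · exact hne h
  · exact hdist _ _ (by omega) (by omega) heq2.symm

-- A's loop returns X μ
lemma pvA_loop_eq (M L : List (String × String)) (name : String) (μ lam : Nat)
    (hlam : 0 < lam) (hrep : pvX M L name (μ+lam) = pvX M L name μ)
    (hdist : ∀ a b, a < b → b < μ+lam → pvX M L name a ≠ pvX M L name b) :
    ∀ f i seen, i ≤ μ+lam →
      (∀ s, PySem.Set.contains seen s = true ↔ ∃ j, j < i ∧ pvX M L name j = s) →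
      μ+lam - i < f →
      resolveAliasLoop M L f seen (pvX M L name i) = pvX M L name μ := by
  intro f
  induction f with
  | zero => intro i seen _ _ h; omega
  | succ f ih =>
    intro i seen hi hseen hfuel
    show resolveAliasLoop M L (f+1) seen (pvX M L name i) = pvX M L name μ
    rw [resolveAliasLoop]
    by_cases hc : PySem.Set.contains seen (pvX M L name i) = true
    · rw [if_pos hc]
      obtain ⟨j, hj, hjeq⟩ := (hseen _).mp hc
      have hik : i = μ + lam := by
        by_contra hne
        exact hdist j i hj (by omega) hjeq
      rw [hik, hrep]
    · rw [if_neg hc]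
      have hilt : i < μ + lam := by
        rcases Nat.lt_or_ge i (μ+lam) with h | h
        · exact h
        · exfalso
          have hieq : i = μ + lam := by omega
          exact hc ((hseen _).mpr ⟨μ, by omega, by rw [hieq]; exact hrep.symm⟩)
      have hseen' : ∀ s, PySem.Set.contains (PySem.Set.add seen (pvX M L name i)) s = true ↔
          ∃ j, j < i+1 ∧ pvX M L name j = s := by
        intro s
        rw [PySem.Set.contains_iff, PySem.Set.mem_add]
        rw [← PySem.Set.contains_iff, hseen s]
        constructor
        · rintro (⟨j, hj, hjeq⟩ | h)
          · exact ⟨j, by omega, hjeq⟩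
          · exact ⟨i, by omega, h.symm⟩
        · rintro ⟨j, hj, hjeq⟩
          rcases Nat.lt_or_ge j i with h | h
          · exact Or.inl ⟨j, h, hjeq⟩
          · have : j = i := by omega
            subst this
            exact Or.inr hjeq.symm
      cases hl : (PySem.Dict.mk L).get? (pvX M L name i) with
      | some v =>
        have hstep : pvStep M L (pvX M L name i) = some v := by unfold pvStep; rw [hl]
        rw [← pvX_succ_of_some hstep]
        exact ih (i+1) _ (by omega) hseen' (by omega)
      | none =>
        cases hm : (PySem.Dict.mk M).get? (pvX M L name i) with
        | some v =>
          have hstep : pvStep M L (pvX M L name i) = some v := by unfold pvStep; rw [hl, hm]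
          rw [← pvX_succ_of_some hstep]
          exact ih (i+1) _ (by omega) hseen' (by omega)
        | none =>
          have hstep : pvStep M L (pvX M L name i) = none := by unfold pvStep; rw [hl, hm]
          have hfix := pvX_succ_of_none hstep
          have hik : i + 1 = μ + lam := by
            by_contra hne
            exact hdist i (i+1) (by omega) (by omega) hfix.symm
          have : pvX M L name μ = pvX M L name i := by
            rw [← hrep, ← hik, hfix]
          rw [this]

lemma pvA_eq (M L : List (String × String)) (name : String) (μ lam : Nat)
    (hlam : 0 < lam) (hrep : pvX M L name (μ+lam) = pvX M L name μ)
    (hdist : ∀ a b, a < b → b < μ+lam → pvX M L name a ≠ pvX M L name b)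
    (hbound : μ + lam ≤ L.length + M.length + 1) :
    resolve_alias name M L = pvX M L name μ := by
  unfold resolve_alias
  have h0 : (PySem.Set.empty : PySem.Set String) = [] := rfl
  have := pvA_loop_eq M L name μ lam hlam hrep hdist
    (L.length + M.length + 2) 0 PySem.Set.empty (by omega)
    (by intro s; rw [h0]; simp [PySem.Set.contains]) (by omega)
  simpa [pvX] using this

-- ===== B-side, cycle case =====
lemma pvStep_isSome_eq {M L : List (String × String)} {name : String} {i : Nat}
    (h : (pvStep M L (pvX M L name i)).isSome) :
    pvStep M L (pvX M L name i) = some (pvX M L name (i+1)) := by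
  cases hs : pvStep M L (pvX M L name i) with
  | none => rw [hs] at h; simp at h
  | some v => rw [pvX_succ_of_some hs]

lemma pvFloyd1_eq (M L : List (String × String)) (name : String) (m : Nat)
    (hsome : ∀ i, (pvStep M L (pvX M L name i)).isSome)
    (hm1 : 1 ≤ m)
    (hmmeet : pvX M L name m = pvX M L name (2*m))
    (hmmin : ∀ i, 1 ≤ i → i < m → pvX M L name i ≠ pvX M L name (2*i)) :
    ∀ f i, i < m → m - i ≤ f →
      pvFloyd1 M L f (pvX M L name i) (pvX M L name (2*i)) = some (pvX M L name m) := by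
  intro f
  induction f with
  | zero => intro i _ _; omega
  | succ f ih =>
    intro i hi hfuel
    show pvFloyd1 M L (f+1) _ _ = _
    rw [pvFloyd1]
    simp only [pvStep_isSome_eq (hsome (2*i)), pvStep_isSome_eq (hsome (2*i+1)),
      pvStep_isSome_eq (hsome i), Option.getD_some]
    rw [show 2*i+1+1 = 2*i+2 from rfl]
    by_cases hmeet : pvX M L name (i+1) = pvX M L name (2*i+2)
    · rw [if_pos hmeet]
      have him : i + 1 = m := by
        by_contra hne
        refine hmmin (i+1) (by omega) (by omega) ?_
        rw [show (2:Nat)*(i+1) = 2*i+2 from by ring]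
        exact hmeet
      rw [show 2*i+2 = 2*m by omega, ← hmmeet]
    · rw [if_neg hmeet]
      have him : i + 1 < m := by
        rcases Nat.lt_or_ge (i+1) m with h | h
        · exact h
        · exfalso
          have : i + 1 = m := by omega
          subst this
          refine hmeet ?_
          rw [show (2:Nat)*i+2 = 2*(i+1) from by ring]
          exact hmmeet
      have := ih (i+1) him (by omega)
      rw [show 2*(i+1) = 2*i+2 by ring] at this
      exact this

lemma pvPhase2_eq (M L : List (String × String)) (name : String) (μ m : Nat)
    (hsome : ∀ i, (pvStep M L (pvX M L name i)).isSome)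
    (hcrit : ∀ j, pvX M L name (m+j) = pvX M L name j ↔ μ ≤ j) :
    ∀ f j, j ≤ μ → μ - j < f →
      pvPhase2 M L f (pvX M L name j) (pvX M L name (m+j)) = pvX M L name μ := by
  intro f
  induction f with
  | zero => intro j _ h; omega
  | succ f ih =>
    intro j hj hfuel
    show pvPhase2 M L (f+1) _ _ = _
    rw [pvPhase2]
    by_cases hmeet : pvX M L name j = pvX M L name (m+j)
    · rw [if_pos hmeet]
      have : μ ≤ j := (hcrit j).mp hmeet.symm
      have : j = μ := by omega
      rw [this]
    · rw [if_neg hmeet]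
      have hjlt : j < μ := by
        rcases Nat.lt_or_ge j μ with h | h
        · exact h
        · exact absurd ((hcrit j).mpr h).symm hmeet
      rw [pvStep_isSome_eq (hsome j), pvStep_isSome_eq (hsome (m+j))]
      simp only [Option.getD_some]
      have := ih (j+1) (by omega) (by omega)
      rw [show m+(j+1) = m+j+1 by omega] at this
      exact this

lemma pvAlt_eq_cycle (M L : List (String × String)) (name : String) (μ lam : Nat)
    (hlam : 0 < lam) (hrep : pvX M L name (μ+lam) = pvX M L name μ)
    (hdist : ∀ a b, a < b → b < μ+lam → pvX M L name a ≠ pvX M L name b)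
    (hbound : μ + lam ≤ L.length + M.length + 1)
    (hsome : ∀ i, (pvStep M L (pvX M L name i)).isSome) :
    resolve_alias_alt name M L = pvX M L name μ := by
  -- the meeting index: least i ≥ 1 with μ ≤ i and lam ∣ i
  have hPex : ∃ i, 1 ≤ i ∧ μ ≤ i ∧ lam ∣ i := by
    refine ⟨lam * (μ/lam + 1), ?_, ?_, ⟨μ/lam + 1, rfl⟩⟩
    · have hmul : lam * (μ/lam + 1) = lam * (μ/lam) + lam := by ring
      omega
    · have hmul : lam * (μ/lam + 1) = lam * (μ/lam) + lam := by ring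
      have h1 := Nat.div_add_mod μ lam
      have h2 := Nat.mod_lt μ hlam
      omega
  set m := Nat.find hPex with hmdef
  obtain ⟨hm1, hmμ, hmdvd⟩ := Nat.find_spec hPex
  have hmle : m ≤ μ + lam := by
    have hmul : lam * (μ/lam + 1) = lam * (μ/lam) + lam := by ring
    have h1 := Nat.div_add_mod μ lam
    have h2 := Nat.mod_lt μ hlam
    have := Nat.find_min' hPex (m := lam * (μ/lam + 1))
      ⟨by omega, by omega, ⟨μ/lam + 1, rfl⟩⟩
    have hle : lam * (μ/lam + 1) ≤ μ + lam := by omega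
    omega
  have hmmeet : pvX M L name m = pvX M L name (2*m) := by
    obtain ⟨c, hc⟩ := hmdvd
    have : 2*m = m + lam*c := by omega
    rw [this, pvPeriodicMul M L name μ lam hrep c m hmμ]
  have hmmin : ∀ i, 1 ≤ i → i < m → pvX M L name i ≠ pvX M L name (2*i) := by
    intro i h1 hilt heq
    have hPi : 1 ≤ i ∧ μ ≤ i ∧ lam ∣ i := by
      have hμi : μ ≤ i := by
        by_contra hlt
        push Not at hlt
        rcases Nat.lt_or_ge (2*i) μ with h2 | h2
        · exact hdist i (2*i) (by omega) (by omega) heq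
        · exact pvLowNe M L name μ lam hlam hrep hdist i (2*i) hlt h2 heq
      have hmod := pvEqMod M L name μ lam hlam hrep hdist i (2*i) hμi (by omega) heq
      have hmeq : (i-μ) ≡ (2*i-μ) [MOD lam] := hmod
      have hdvd : lam ∣ (2*i-μ) - (i-μ) := (Nat.modEq_iff_dvd' (by omega)).mp hmeq
      have : (2*i-μ) - (i-μ) = i := by omega
      rw [this] at hdvd
      exact ⟨h1, hμi, hdvd⟩
    exact absurd hPi (Nat.find_min hPex hilt)
  have hcrit : ∀ j, pvX M L name (m+j) = pvX M L name j ↔ μ ≤ j := by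
    intro j
    constructor
    · intro heq
      by_contra hlt
      push Not at hlt
      exact pvLowNe M L name μ lam hlam hrep hdist j (m+j) hlt (by omega) heq.symm
    · intro hj
      obtain ⟨c, hc⟩ := hmdvd
      have : m + j = j + lam*c := by omega
      rw [this, pvPeriodicMul M L name μ lam hrep c j hj]
  unfold resolve_alias_alt
  have hf1 := pvFloyd1_eq M L name m hsome hm1 hmmeet hmmin
    (L.length + M.length + 2) 0 (by omega) (by omega)
  simp only [pvX] at hf1
  rw [hf1]
  have hp2 := pvPhase2_eq M L name μ m hsome hcrit (L.length + M.length + 2) 0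
    (by omega) (by omega)
  rw [show m + 0 = m by omega] at hp2
  rw [show pvX M L name 0 = name from rfl] at hp2
  exact hp2

-- ===== B-side, terminating-chain case =====
lemma pvFloyd1_none (M L : List (String × String)) (name : String) (k0 : Nat)
    (hdistk : ∀ a b, a < b → b ≤ k0 → pvX M L name a ≠ pvX M L name b)
    (hnone : pvStep M L (pvX M L name k0) = none)
    (hk0min : ∀ i, i < k0 → (pvStep M L (pvX M L name i)).isSome) :
    ∀ f i, 2*i ≤ k0 → pvFloyd1 M L f (pvX M L name i) (pvX M L name (2*i)) = none := by
  intro f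
  induction f with
  | zero => intro i _; rfl
  | succ f ih =>
    intro i hi
    show pvFloyd1 M L (f+1) _ _ = none
    rw [pvFloyd1]
    rcases Nat.lt_or_ge (2*i) k0 with h2i | h2i
    · rcases Nat.lt_or_ge (2*i+1) k0 with h2i1 | h2i1
      · simp only [pvStep_isSome_eq (hk0min (2*i) h2i),
          pvStep_isSome_eq (hk0min (2*i+1) h2i1),
          pvStep_isSome_eq (hk0min i (by omega : i < k0)), Option.getD_some]
        rw [show 2*i+1+1 = 2*i+2 from rfl]
        have hne : pvX M L name (i+1) ≠ pvX M L name (2*i+2) :=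
          hdistk (i+1) (2*i+2) (by omega) (by omega)
        rw [if_neg hne]
        have := ih (i+1) (by omega)
        rw [show 2*(i+1) = 2*i+2 by ring] at this
        exact this
      · have h1 : (2:Nat)*i+1 = k0 := by omega
        have h2 : pvStep M L (pvX M L name (2*i+1)) = none := by rw [h1]; exact hnone
        simp only [pvStep_isSome_eq (hk0min (2*i) h2i), h2]
    · have h1 : (2:Nat)*i = k0 := by omega
      have h2 : pvStep M L (pvX M L name (2*i)) = none := by rw [h1]; exact hnone
      simp only [h2]

lemma pvTermWalk_eq (M L : List (String × String)) (name : String) (k0 : Nat)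
    (hnone : pvStep M L (pvX M L name k0) = none)
    (hk0min : ∀ i, i < k0 → (pvStep M L (pvX M L name i)).isSome) :
    ∀ f i, i ≤ k0 → k0 - i < f → pvTermWalk M L f (pvX M L name i) = pvX M L name k0 := by
  intro f
  induction f with
  | zero => intro i _ h; omega
  | succ f ih =>
    intro i hi hfuel
    show pvTermWalk M L (f+1) _ = _
    rw [pvTermWalk]
    rcases Nat.lt_or_ge i k0 with h | h
    · rw [pvStep_isSome_eq (hk0min i h)]
      exact ih (i+1) (by omega) (by omega)
    · have : i = k0 := by omega
      rw [this, hnone]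

lemma pvAlt_eq_term (M L : List (String × String)) (name : String) (k0 : Nat)
    (hdistk : ∀ a b, a < b → b ≤ k0 → pvX M L name a ≠ pvX M L name b)
    (hnone : pvStep M L (pvX M L name k0) = none)
    (hk0min : ∀ i, i < k0 → (pvStep M L (pvX M L name i)).isSome)
    (hk0b : k0 ≤ L.length + M.length + 1) :
    resolve_alias_alt name M L = pvX M L name k0 := by
  unfold resolve_alias_alt
  have hf := pvFloyd1_none M L name k0 hdistk hnone hk0min (L.length + M.length + 2) 0 (by omega)
  simp only [Nat.mul_zero] at hf
  rw [show pvX M L name 0 = name from rfl] at hf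
  rw [hf]
  have ht := pvTermWalk_eq M L name k0 hnone hk0min (L.length + M.length + 2) 0 (by omega) (by omega)
  rw [show pvX M L name 0 = name from rfl] at ht
  exact ht

-- ===== main equality =====
lemma pv_main (name : String) (M L : List (String × String)) :
    resolve_alias name M L = resolve_alias_alt name M L := by
  obtain ⟨kp, hkpb, jp, hjp, hjpeq⟩ := pv_exists_repeat M L name
  have hex : ∃ kk, ∃ j, j < kk ∧ pvX M L name j = pvX M L name kk := ⟨kp, jp, hjp, hjpeq⟩
  set k := Nat.find hex with hkdef
  obtain ⟨j, hjk, hjeq⟩ := Nat.find_spec hex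
  have hkb : k ≤ L.length + M.length + 1 :=
    le_trans (Nat.find_min' hex ⟨jp, hjp, hjpeq⟩) hkpb
  have hdist : ∀ a b, a < b → b < k → pvX M L name a ≠ pvX M L name b := by
    intro a b hab hbk heq
    exact Nat.find_min hex hbk ⟨a, hab, heq⟩
  -- μ = j, lam = k - j
  have hlam : 0 < k - j := by omega
  have hμlam : j + (k - j) = k := by omega
  have hrep : pvX M L name (j + (k-j)) = pvX M L name j := by rw [hμlam]; exact hjeq.symm
  have hdist' : ∀ a b, a < b → b < j + (k-j) → pvX M L name a ≠ pvX M L name b := by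
    rw [hμlam]; exact hdist
  have hbound : j + (k - j) ≤ L.length + M.length + 1 := by omega
  have hA := pvA_eq M L name j (k-j) hlam hrep hdist' hbound
  by_cases hterm : ∃ i, pvStep M L (pvX M L name i) = none
  · -- terminating chain
    set k0 := Nat.find hterm with hk0def
    have hnone := Nat.find_spec hterm
    have hk0min : ∀ i, i < k0 → (pvStep M L (pvX M L name i)).isSome := by
      intro i hi
      cases hs : pvStep M L (pvX M L name i) with
      | none => exact absurd hs (Nat.find_min hterm hi)
      | some v => rfl
    have hkk0 : k = k0 + 1 := by
      have hle : k ≤ k0 + 1 :=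
        Nat.find_min' hex ⟨k0, by omega, (pvX_succ_of_none hnone).symm⟩
      rcases Nat.lt_or_ge k0 k with h | h
      · omega
      · -- k ≤ k0: contradiction via periodicity hitting a defined step at X k0's value
        exfalso
        have hred := pvReduce M L name j (k-j) hlam hrep k0 (by omega)
        set c := j + (k0-j) % (k-j) with hcdef
        have hclt : c < k := by
          have := Nat.mod_lt (k0-j) hlam
          omega
        have hsome := hk0min c (by omega)
        rw [← hred] at hsome
        rw [hnone] at hsome
        simp at hsome
    have hlam1 : k - j = 1 := by
      by_contra hne
      have h2 : 2 ≤ k - j := by omega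
      have hjk0 : j < k0 := by omega
      have heq0 : pvX M L name j = pvX M L name k0 := by
        have h1 : pvX M L name (j + (k-j)) = pvX M L name j := hrep
        have h2' : pvX M L name (k0+1) = pvX M L name k0 := pvX_succ_of_none hnone
        rw [hμlam, hkk0] at h1
        rw [← h1, h2']
      exact hdist j k0 hjk0 (by omega) heq0
    have hjk0 : j = k0 := by omega
    have hdistk : ∀ a b, a < b → b ≤ k0 → pvX M L name a ≠ pvX M L name b := by
      intro a b hab hbk
      exact hdist a b hab (by omega)
    have hB := pvAlt_eq_term M L name k0 hdistk hnone hk0min (by omega)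
    rw [hA, hB, hjk0]
  · push Not at hterm
    have hsome : ∀ i, (pvStep M L (pvX M L name i)).isSome := by
      intro i
      cases hs : pvStep M L (pvX M L name i) with
      | none => exact absurd hs (hterm i)
      | some v => rfl
    have hB := pvAlt_eq_cycle M L name j (k-j) hlam hrep hdist' hbound hsome
    rw [hA, hB]

-- ===== VERDICT (by name: the statement is the Claim_ definition above) =====
theorem resolve_alias_spec : Claim_equal_resolve_alias := by
  intro name macro_map local_map _
  unfold Spec_resolve_alias
  exact pv_main name macro_map local_map
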